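-- pv_equiv track=rewrite | github.com/khuzaima-ocs/python-training | Problems/basic_problem_2.py | reverse_binary
-- ===== SOURCE A (Python) =====
-- def reverse_binary(number):
--     reverse = 0
--
--     while number > 1:
--         remainder = number % 2
--         reverse = (reverse * 10) + remainder
--
--         number //= 10
--
--     reverse = (reverse * 10) + number
--
--     return reverse
-- ===== SOURCE B (Python) =====
-- def _bits(n):
--     # list of emitted parity digits, ending with the leftover value
--     if n > 1:
--         return [n % 2] + _bits(n // 10)
--     return [n]
--
--
-- def reverse_binary(number):
--     result = 0
--     for d in _bits(number):
--         result = result * 10 + d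
--     return result
-- ===== Notes on version B (the rewrite author's own statement) =====
-- stated objective: alternative
-- what changed: Splits A's single fused accumulator loop into two stages: a recursion that materialises the list of parity digits (ending with the leftover value), and a separate fold that combines the list into the decimal result.
import Mathlib
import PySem

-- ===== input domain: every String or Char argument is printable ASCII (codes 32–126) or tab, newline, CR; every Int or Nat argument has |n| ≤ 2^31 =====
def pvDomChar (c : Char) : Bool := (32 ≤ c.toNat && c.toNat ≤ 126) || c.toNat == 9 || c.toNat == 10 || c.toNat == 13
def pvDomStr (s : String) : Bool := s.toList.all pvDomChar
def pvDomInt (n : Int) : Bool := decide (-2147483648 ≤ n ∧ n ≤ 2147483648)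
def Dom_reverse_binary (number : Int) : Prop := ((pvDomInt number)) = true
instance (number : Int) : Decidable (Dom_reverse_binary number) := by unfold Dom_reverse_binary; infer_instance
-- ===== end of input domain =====

-- B replaces A's fused accumulator loop by two stages: build the list of parity digits, then fold it; alternative structure, same cost.

-- ===== PORT A =====
-- while number > 1: reverse = reverse*10 + number % 2; number //= 10; then reverse = reverse*10 + number
def reverseBinaryLoop (number reverse : Int) : Int :=
  if _h : number > 1 then
    reverseBinaryLoop (PySem.Int.floordiv number 10) (reverse * 10 + PySem.Int.mod number 2)
  else
    reverse * 10 + number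
termination_by number.toNat
decreasing_by
  have := PySem.Int.floordiv_eq_ediv_of_pos (a := number) (b := 10) (by omega)
  rw [this]; omega

def reverse_binary (number : Int) : Int := reverseBinaryLoop number 0

-- ===== PORT B =====
-- _bits(n): the list of emitted parity digits, ending with the leftover value
def rbBits (n : Int) : List Int :=
  if _h : n > 1 then
    PySem.Int.mod n 2 :: rbBits (PySem.Int.floordiv n 10)
  else
    [n]
termination_by n.toNat
decreasing_by
  have := PySem.Int.floordiv_eq_ediv_of_pos (a := n) (b := 10) (by omega)
  rw [this]; omega

-- for d in _bits(number): result = result*10 + d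
def reverse_binary_alt (number : Int) : Int :=
  (rbBits number).foldl (fun result d => result * 10 + d) 0

-- ===== PRECONDITION & SPEC =====
def Spec_reverse_binary (number : Int) (out : Int) : Prop := out = reverse_binary_alt number
instance (number : Int) (out : Int) : Decidable (Spec_reverse_binary number out) := by unfold Spec_reverse_binary; infer_instance

-- ===== CLAIM (what is proved, stated in full; the proofs are below) =====
def Claim_equal_reverse_binary : Prop := ∀ (number : Int), Dom_reverse_binary number → Spec_reverse_binary number (reverse_binary number)

-- ===== LEMMAS AND PROOFS =====

-- Loop invariant: A's loop from accumulator r equals folding B's digit list starting from r.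
theorem reverseBinaryLoop_eq_foldl (number reverse : Int) :
    reverseBinaryLoop number reverse
      = (rbBits number).foldl (fun result d => result * 10 + d) reverse := by
  induction number, reverse using reverseBinaryLoop.induct with
  | case1 n r h ih =>
      rw [reverseBinaryLoop, rbBits]
      simp only [h, dif_pos, List.foldl_cons]
      exact ih
  | case2 n r h =>
      rw [reverseBinaryLoop, rbBits, dif_neg h, dif_neg h, List.foldl_cons, List.foldl_nil]

-- ===== VERDICT (by name: the statement is the Claim_ definition above) =====
theorem reverse_binary_spec : Claim_equal_reverse_binary := by
  intro number _
  unfold Spec_reverse_binary reverse_binary reverse_binary_alt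
  exact reverseBinaryLoop_eq_foldl number 0
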